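-- pv_equiv track=rewrite | github.com/Jingzheng-Li/Taichi_VariousDemos | sortmesh.py | morton_sort_indices
-- ===== SOURCE A (Python) =====
-- def morton_code(i, j):
--     """计算二维坐标(i, j)的Morton码。"""
--     def split_bits(n):
--         """将整数n的二进制位展开并插入0位。"""
--         n &= 0xFFFF  # 确保n为16位整数
--         n = (n | (n << 8)) & 0x00FF00FF
--         n = (n | (n << 4)) & 0x0F0F0F0F
--         n = (n | (n << 2)) & 0x33333333
--         n = (n | (n << 1)) & 0x55555555
--         return n
--     return split_bits(i) | (split_bits(j) << 1)
--
-- def morton_sort_indices(grid_size):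
--     """根据Morton码对网格中的顶点进行排序。
--
--     参数：
--     - grid_size: 网格尺寸，表示网格为grid_size x grid_size
--
--     返回：
--     - sorted_indices: 按照Morton码排序的顶点索引列表
--     """
--     indices = []
--     for i in range(grid_size):
--         for j in range(grid_size):
--             code = morton_code(i, j)
--             index = i * grid_size + j  # 原始索引
--             indices.append((code, index))
--     # 根据Morton码排序
--     indices.sort()
--     # 提取排序后的索引
--     sorted_indices = [index for (code, index) in indices]
--     return sorted_indices
-- ===== SOURCE B (Python) =====
-- def morton_sort_indices(grid_size):
--     """Bucket sort by Morton code: group indices into a dict keyed by code,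
--     then emit buckets by scanning code values upward -- no comparison sort."""
--     if grid_size <= 0:
--         return []
--
--     def split_bits(n):
--         n &= 0xFFFF
--         n = (n | (n << 8)) & 0x00FF00FF
--         n = (n | (n << 4)) & 0x0F0F0F0F
--         n = (n | (n << 2)) & 0x33333333
--         n = (n | (n << 1)) & 0x55555555
--         return n
--
--     col = [split_bits(j) << 1 for j in range(grid_size)]
--     buckets = {}
--     for i in range(grid_size):
--         row = split_bits(i)
--         base = i * grid_size
--         for j, cj in enumerate(col):
--             buckets.setdefault(row | cj, []).append(base + j)
--     out = []
--     for code in range(max(buckets) + 1):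
--         if code in buckets:
--             out.extend(buckets[code])
--     return out
-- ===== Notes on version B (the rewrite author's own statement) =====
-- stated objective: alternative
-- what changed: Replaces the comparison sort of (code, index) pairs by a bucket sort: indices are grouped into a dict keyed by Morton code (with a per-column table of pre-split bits), and the result is emitted by scanning code values upward.
import Mathlib
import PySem

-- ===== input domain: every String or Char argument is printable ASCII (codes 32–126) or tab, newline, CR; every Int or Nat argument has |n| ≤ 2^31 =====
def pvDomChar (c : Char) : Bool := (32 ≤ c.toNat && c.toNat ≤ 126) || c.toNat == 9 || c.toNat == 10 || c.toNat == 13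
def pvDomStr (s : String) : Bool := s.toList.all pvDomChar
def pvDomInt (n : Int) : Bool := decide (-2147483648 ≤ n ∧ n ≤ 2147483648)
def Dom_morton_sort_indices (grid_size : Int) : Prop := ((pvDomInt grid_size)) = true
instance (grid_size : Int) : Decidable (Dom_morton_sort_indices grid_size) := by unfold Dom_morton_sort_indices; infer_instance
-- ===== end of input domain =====

-- B replaces the comparison sort of (code, index) pairs by a dict-of-buckets keyed by
-- Morton code, emitted by an upward scan over code values (objective: alternative).

-- ===== PORT A =====
-- split_bits: Python '&' '|' '<<' on ints are PySem.Int.band / PySem.Int.bor / core '<<<' (exact)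
def amsSplitBits (n : Int) : Int :=
  let n1 := PySem.Int.band n 0xFFFF
  let n2 := PySem.Int.band (PySem.Int.bor n1 (n1 <<< (8:Nat))) 0x00FF00FF
  let n3 := PySem.Int.band (PySem.Int.bor n2 (n2 <<< (4:Nat))) 0x0F0F0F0F
  let n4 := PySem.Int.band (PySem.Int.bor n3 (n3 <<< (2:Nat))) 0x33333333
  PySem.Int.band (PySem.Int.bor n4 (n4 <<< (1:Nat))) 0x55555555

def amsMortonCode (i j : Int) : Int :=
  PySem.Int.bor (amsSplitBits i) (amsSplitBits j <<< (1:Nat))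

def morton_sort_indices (grid_size : Int) : List Int :=
  let indices : List (Int × Int) :=
    (PySem.List.pyRange 0 grid_size).foldl (fun acc i =>
      (PySem.List.pyRange 0 grid_size).foldl (fun acc j =>
        acc ++ [(amsMortonCode i j, i * grid_size + j)]) acc) []
  -- indices.sort() on int pairs: Python tuple comparison = sorted2 with fst/snd keys
  let sortedIdx := PySem.List.sorted2 indices (fun p => p.1) (fun p => p.2)
  sortedIdx.map (fun p => p.2)

-- ===== PORT B =====
def altSplitBits (n : Int) : Int :=
  let n1 := PySem.Int.band n 0xFFFF
  let n2 := PySem.Int.band (PySem.Int.bor n1 (n1 <<< (8:Nat))) 0x00FF00FF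
  let n3 := PySem.Int.band (PySem.Int.bor n2 (n2 <<< (4:Nat))) 0x0F0F0F0F
  let n4 := PySem.Int.band (PySem.Int.bor n3 (n3 <<< (2:Nat))) 0x33333333
  PySem.Int.band (PySem.Int.bor n4 (n4 <<< (1:Nat))) 0x55555555

def morton_sort_indices_alt (grid_size : Int) : List Int :=
  if grid_size ≤ 0 then []
  else
    let col := (PySem.List.pyRange 0 grid_size).map (fun j => altSplitBits j <<< (1:Nat))
    let buckets : PySem.Dict Int (List Int) :=
      (PySem.List.pyRange 0 grid_size).foldl (fun bk i =>
        let row := altSplitBits i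
        let base := i * grid_size
        -- buckets.setdefault(row | cj, []).append(base + j)  =  Dict.modify
        (PySem.List.enumerate col).foldl (fun bk jc =>
          bk.modify (PySem.Int.bor row jc.2) [] (fun l => l ++ [base + jc.1])) bk)
        PySem.Dict.empty
    let hi := (PySem.List.max? buckets.keys (fun k => k)).getD 0
    (PySem.List.pyRange 0 (hi + 1)).foldl (fun out code =>
      if buckets.contains code then out ++ buckets.getD code [] else out) []

-- ===== PRECONDITION & SPEC =====
def Spec_morton_sort_indices (grid_size : Int) (out : List Int) : Prop := out = morton_sort_indices_alt grid_size
instance (grid_size : Int) (out : List Int) : Decidable (Spec_morton_sort_indices grid_size out) := by unfold Spec_morton_sort_indices; infer_instance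

-- ===== CLAIM (what is proved, stated in full; the proofs are below) =====
def Claim_equal_morton_sort_indices : Prop := ∀ (grid_size : Int), Dom_morton_sort_indices grid_size → Spec_morton_sort_indices grid_size (morton_sort_indices grid_size)

-- ===== LEMMAS AND PROOFS =====

-- proof-side abbreviations
def pvPairs (g : Int) : List (Int × Int) :=
  (PySem.List.pyRange 0 g).flatMap (fun i =>
    (PySem.List.pyRange 0 g).map (fun j => (amsMortonCode i j, i * g + j)))

def pvKey (p : Int × Int) : Int := p.1 * 4611686018427387904 + p.2

def pvHi (g : Int) : Int :=
  (PySem.List.max? (PySem.Set.ofList ((pvPairs g).map (fun p => p.1))) (fun k => k)).getD 0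

def pvCanon (g : Int) : List (Int × Int) :=
  (PySem.List.pyRange 0 (pvHi g + 1)).flatMap (fun c =>
    (pvPairs g).filter (fun p => p.1 == c))

theorem altSplit_eq : altSplitBits = amsSplitBits := rfl

theorem splitBits_nonneg (n : Int) : 0 ≤ amsSplitBits n := by
  unfold amsSplitBits
  rw [PySem.Int.band_comm]
  exact PySem.Int.band_nonneg_of_nonneg_left _ (by norm_num)

theorem mortonCode_nonneg (i j : Int) : 0 ≤ amsMortonCode i j := by
  unfold amsMortonCode
  rw [PySem.Int.bor_of_nonneg (splitBits_nonneg i)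
      (by rw [Int.shiftLeft_eq]; exact mul_nonneg (splitBits_nonneg j) (by norm_num))]
  exact Int.natCast_nonneg _

theorem mem_pvPairs {g : Int} {p : Int × Int} (h : p ∈ pvPairs g) :
    ∃ i j, 0 ≤ i ∧ i < g ∧ 0 ≤ j ∧ j < g ∧ p = (amsMortonCode i j, i * g + j) := by
  simp only [pvPairs, List.mem_flatMap, List.mem_map, PySem.List.mem_pyRange_one] at h
  obtain ⟨i, ⟨hi0, hi1⟩, j, ⟨hj0, hj1⟩, hp⟩ := h
  exact ⟨i, j, hi0, hi1, hj0, hj1, hp.symm⟩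

theorem pvPairs_bounds {g : Int} (hg : g ≤ 2147483648) {p : Int × Int} (h : p ∈ pvPairs g) :
    0 ≤ p.1 ∧ 0 ≤ p.2 ∧ p.2 < 4611686018427387904 := by
  obtain ⟨i, j, hi0, hi1, hj0, hj1, hp⟩ := mem_pvPairs h
  subst hp
  refine ⟨mortonCode_nonneg i j, ?_, ?_⟩
  · have := mul_nonneg hi0 (show (0:Int) ≤ g by omega)
    omega
  have h1 : i * g ≤ (g - 1) * g := by
    apply mul_le_mul_of_nonneg_right (by omega) (by omega)
  have h2 : g * g ≤ 2147483648 * 2147483648 := by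
    apply mul_le_mul hg hg (by omega) (by norm_num)
  nlinarith

theorem pvPairs_pairwise_snd (g : Int) :
    (pvPairs g).Pairwise (fun a b => a.2 < b.2) := by
  unfold pvPairs
  rw [List.pairwise_flatMap]
  constructor
  · intro i _
    rw [List.pairwise_map]
    exact (PySem.List.pairwise_lt_pyRange_one 0 g).imp (by intro a b h; simpa using h)
  · have := PySem.List.pairwise_lt_pyRange_one 0 g
    refine this.imp_of_mem ?_
    intro i1 i2 h1 h2 hlt x hx y hy
    simp only [List.mem_map, PySem.List.mem_pyRange_one] at hx hy h1 h2
    obtain ⟨j1, ⟨hj10, hj11⟩, hx⟩ := hx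
    obtain ⟨j2, ⟨hj20, hj21⟩, hy⟩ := hy
    subst hx; subst hy
    simp only
    have : (i1 + 1) * g ≤ i2 * g :=
      mul_le_mul_of_nonneg_right (by omega) (by omega)
    nlinarith

theorem pvPairs_fst_le_hi {g : Int} {p : Int × Int} (h : p ∈ pvPairs g) :
    p.1 ≤ pvHi g := by
  have hmem : p.1 ∈ PySem.Set.ofList ((pvPairs g).map (fun p => p.1)) := by
    rw [PySem.Set.mem_ofList]
    exact List.mem_map_of_mem h
  have hne : PySem.Set.ofList ((pvPairs g).map (fun p => p.1)) ≠ [] :=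
    List.ne_nil_of_mem hmem
  rcases hm : PySem.List.max? (PySem.Set.ofList ((pvPairs g).map (fun p => p.1)))
      (fun k => k) with _ | m
  · exact absurd ((PySem.List.max?_eq_none_iff _ _).mp hm) hne
  · have := PySem.List.max?_isMax hm _ hmem
    simpa [pvHi, hm] using this

-- generic: flatMap of filters over a nodup covering code list is a permutation
theorem flatMap_filter_perm (cs : List Int) :
    ∀ ps : List (Int × Int), cs.Nodup → (∀ p ∈ ps, p.1 ∈ cs) →
    (cs.flatMap (fun c => ps.filter (fun p => p.1 == c))).Perm ps := by
  induction cs with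
  | nil =>
    intro ps _ hcov
    have : ps = [] := by
      cases ps with
      | nil => rfl
      | cons q qs => exact absurd (hcov q (by simp)) (by simp)
    simp [this]
  | cons c cs ih =>
    intro ps hnd hcov
    rw [List.nodup_cons] at hnd
    have hrest : ∀ c' ∈ cs, ps.filter (fun p => p.1 == c') =
        (ps.filter (fun p => !(p.1 == c))).filter (fun p => p.1 == c') := by
      intro c' hc'
      rw [List.filter_filter]
      apply List.filter_congr
      intro p _
      by_cases h : p.1 = c'
      · have hne : c' ≠ c := by
          rintro rfl
          exact hnd.1 hc'
        simp [h, hne]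
      · simp [h]
    rw [List.flatMap_cons, List.flatMap_congr hrest]
    have hcov' : ∀ p ∈ ps.filter (fun p => !(p.1 == c)), p.1 ∈ cs := by
      intro p hp
      have := List.mem_filter.mp hp
      have h1 := hcov p this.1
      have h2 : ¬ p.1 = c := by simpa using this.2
      simp only [List.mem_cons] at h1
      tauto
    have hperm := ih (ps.filter (fun p => !(p.1 == c))) hnd.2 hcov'
    exact (List.Perm.append_left _ hperm).trans
      (List.filter_append_perm (fun p => p.1 == c) ps)

-- pairwise key-increasing on the canonical list
theorem pvCanon_pairwise_key {g : Int} (hg : g ≤ 2147483648) :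
    (pvCanon g).Pairwise (fun a b => pvKey a < pvKey b) := by
  unfold pvCanon
  rw [List.pairwise_flatMap]
  constructor
  · intro c _
    have hpw := List.Pairwise.sublist (List.filter_sublist)
      (pvPairs_pairwise_snd g) (l₁ := (pvPairs g).filter (fun p => p.1 == c))
    refine hpw.imp_of_mem ?_
    intro a b ha hb' hlt
    have ha' := List.mem_filter.mp ha
    have hb'' := List.mem_filter.mp hb'
    have e1 : a.1 = c := by simpa using ha'.2
    have e2 : b.1 = c := by simpa using hb''.2
    unfold pvKey
    rw [e1, e2]
    omega
  · refine (PySem.List.pairwise_lt_pyRange_one 0 (pvHi g + 1)).imp ?_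
    intro c1 c2 hlt x hx y hy
    have hx' := List.mem_filter.mp hx
    have hy' := List.mem_filter.mp hy
    have e1 : x.1 = c1 := by simpa using hx'.2
    have e2 : y.1 = c2 := by simpa using hy'.2
    obtain ⟨_, _, hx3⟩ := pvPairs_bounds hg hx'.1
    obtain ⟨_, hy2, _⟩ := pvPairs_bounds hg hy'.1
    unfold pvKey
    rw [e1, e2]
    omega

theorem sorted_key_eq_canon {g : Int} (hb : g ≤ 2147483648) :
    PySem.List.sorted (pvPairs g) pvKey = pvCanon g := by
  apply PySem.List.sorted_eq_of_perm_of_pairwise_lt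
  · apply flatMap_filter_perm
    · exact PySem.List.nodup_pyRange_one 0 (pvHi g + 1)
    · intro p hp
      rw [PySem.List.mem_pyRange_one]
      have := (pvPairs_bounds hb hp).1
      have := pvPairs_fst_le_hi hp
      omega
  · exact pvCanon_pairwise_key hb

-- insertBy congruence machinery (sorted2 with fst/snd keys = sorted with the packed key)
theorem insertBy_congr {α : Type} {before before' : α → α → Bool} {x : α} {ys : List α}
    (h : ∀ y ∈ ys, before x y = before' x y) :
    PySem.List.insertBy before x ys = PySem.List.insertBy before' x ys := by
  induction ys with
  | nil => rfl
  | cons y ys ih =>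
    simp only [PySem.List.insertBy]
    rw [h y (by simp)]
    cases before' x y
    · simp [ih (fun z hz => h z (by simp [hz]))]
    · simp

theorem foldl_insertBy_congr {α : Type} (S : α → Prop) {before before' : α → α → Bool}
    (hbb : ∀ a b, S a → S b → before a b = before' a b) :
    ∀ (xs acc : List α), (∀ x ∈ xs, S x) → (∀ y ∈ acc, S y) →
    xs.foldl (fun acc x => PySem.List.insertBy before x acc) acc =
    xs.foldl (fun acc x => PySem.List.insertBy before' x acc) acc := by
  intro xs
  induction xs with
  | nil => intros; rfl
  | cons x xs ih =>
    intro acc hxs hacc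
    simp only [List.foldl_cons]
    rw [insertBy_congr (fun y hy => hbb x y (hxs x (by simp)) (hacc y hy))]
    apply ih
    · exact fun z hz => hxs z (by simp [hz])
    · intro y hy
      rw [PySem.List.mem_insertBy] at hy
      rcases hy with rfl | hy
      · exact hxs y (by simp)
      · exact hacc y hy

theorem sorted2_eq_sorted_key {g : Int} (hb : g ≤ 2147483648) :
    PySem.List.sorted2 (pvPairs g) (fun p => p.1) (fun p => p.2) =
    PySem.List.sorted (pvPairs g) pvKey := by
  show (pvPairs g).foldl (fun acc x => PySem.List.insertBy _ x acc) [] =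
       (pvPairs g).foldl (fun acc x => PySem.List.insertBy _ x acc) []
  apply foldl_insertBy_congr (fun p => p ∈ pvPairs g)
  · intro a b ha hb'
    obtain ⟨_, ha2, ha3⟩ := pvPairs_bounds hb ha
    obtain ⟨_, hb2, hb3⟩ := pvPairs_bounds hb hb'
    rw [Bool.eq_iff_iff]
    simp [pvKey]
    omega
  · exact fun x hx => hx
  · intro y hy; cases hy

-- A's generated pair list is pvPairs
theorem pairs_eq (g : Int) :
    (PySem.List.pyRange 0 g).foldl (fun acc i =>
      (PySem.List.pyRange 0 g).foldl (fun acc j =>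
        acc ++ [(amsMortonCode i j, i * g + j)]) acc) [] = pvPairs g := by
  rw [PySem.List.foldl_congr_mem _ _
    (fun acc i => acc ++ (PySem.List.pyRange 0 g).map (fun j => (amsMortonCode i j, i * g + j))) _
    (by intro acc i _; rw [PySem.List.foldl_append_singleton_eq_map])]
  rw [PySem.List.foldl_append_eq_flatMap]
  rfl

-- A's result is the canonical bucket concatenation
theorem A_eq_canon {g : Int} (hb : g ≤ 2147483648) :
    morton_sort_indices g = (pvCanon g).map (fun p => p.2) := by
  show (PySem.List.sorted2 _ _ _).map _ = _
  rw [pairs_eq, sorted2_eq_sorted_key hb, sorted_key_eq_canon hb]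

-- enumerate over pyRange / map
theorem enumerate_map {α β : Type} (f : α → β) (xs : List α) (s : Int) :
    PySem.List.enumerate (xs.map f) s =
    (PySem.List.enumerate xs s).map (fun p => (p.1, f p.2)) := by
  induction xs generalizing s with
  | nil => rfl
  | cons x xs ih => simp [PySem.List.enumerate_cons, ih]

theorem enumerate_pyRange : ∀ (n : Nat) (a b : Int), (b - a).toNat = n →
    PySem.List.enumerate (PySem.List.pyRange a b) a =
    (PySem.List.pyRange a b).map (fun j => (j, j)) := by
  intro n
  induction n with
  | zero =>
    intro a b h
    rw [PySem.List.pyRange_one_eq_nil (by omega)]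
    rfl
  | succ n ih =>
    intro a b h
    rw [PySem.List.pyRange_one_cons (by omega)]
    rw [PySem.List.enumerate_cons, List.map_cons, ih (a + 1) b (by omega)]

theorem scan_eq (d : PySem.Dict Int (List Int)) (ps : List (Int × Int)) (N : Int)
    (hgetD : ∀ c, d.getD c [] = (ps.filter (fun p => p.1 == c)).map (fun p => p.2))
    (hcont : ∀ c, d.contains c = true ↔ c ∈ ps.map (fun p => p.1)) :
    (PySem.List.pyRange 0 N).foldl
      (fun out code => if d.contains code = true then out ++ d.getD code [] else out) [] =
    (PySem.List.pyRange 0 N).flatMap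
      (fun c => (ps.filter (fun p => p.1 == c)).map (fun p => p.2)) := by
  rw [PySem.List.foldl_congr_mem (PySem.List.pyRange 0 N)
    (fun out code => if d.contains code = true then out ++ d.getD code [] else out)
    (fun out code => out ++ (ps.filter (fun p => p.1 == code)).map (fun p => p.2)) []
    ?hstep]
  · rw [PySem.List.foldl_append_eq_flatMap, List.nil_append]
  case hstep =>
    intro acc c _
    dsimp only
    by_cases hc : d.contains c = true
    · rw [if_pos hc, hgetD]
    · rw [if_neg hc]
      have hnil : ps.filter (fun p => p.1 == c) = [] := by
        rw [List.filter_eq_nil_iff]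
        intro p hp hbeq
        exact hc ((hcont c).mpr (by
          have hpc : p.1 = c := by simpa using hbeq
          exact hpc ▸ List.mem_map_of_mem hp))
      rw [hnil]
      simp

theorem B_eq_canon {g : Int} (hg : 0 < g) :
    morton_sort_indices_alt g = (pvCanon g).map (fun p => p.2) := by
  have hng : ¬ g ≤ 0 := by omega
  simp only [morton_sort_indices_alt, if_neg hng]
  have hcol : PySem.List.enumerate ((PySem.List.pyRange 0 g).map (fun j => altSplitBits j <<< (1:Nat))) =
      (PySem.List.pyRange 0 g).map (fun j => (j, altSplitBits j <<< (1:Nat))) := by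
    rw [enumerate_map, enumerate_pyRange (g - 0).toNat 0 g rfl]
    simp [List.map_map, Function.comp]
  have hbuckets :
      (List.foldl (fun bk i =>
          List.foldl (fun bk jc => bk.modify (PySem.Int.bor (altSplitBits i) jc.2) [] fun l => l ++ [i * g + jc.1])
            bk (PySem.List.enumerate ((PySem.List.pyRange 0 g).map (fun j => altSplitBits j <<< (1:Nat)))))
        PySem.Dict.empty (PySem.List.pyRange 0 g)) =
      (pvPairs g).foldl (fun d p => d.modify p.1 [] (fun l => l ++ [p.2])) PySem.Dict.empty := by
    rw [hcol]
    unfold pvPairs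
    rw [List.foldl_flatMap]
    rw [altSplit_eq]
    simp only [List.foldl_map, amsMortonCode]
  rw [hbuckets]
  have hkeys : ((pvPairs g).foldl (fun d p => d.modify p.1 [] fun l => l ++ [p.2]) PySem.Dict.empty).keys
      = PySem.Set.ofList ((pvPairs g).map (fun p => p.1)) := by
    rw [PySem.Dict.keys_foldl_modify_key (pvPairs g) (fun p => p.1) [] (fun _ p => fun l => l ++ [p.2]) PySem.Dict.empty]
    rw [PySem.Dict.keys_empty]
    rfl
  have hgetD : ∀ c, ((pvPairs g).foldl (fun d p => d.modify p.1 [] fun l => l ++ [p.2]) PySem.Dict.empty).getD c []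
      = ((pvPairs g).filter (fun p => p.1 == c)).map (fun p => p.2) := by
    intro c
    rw [PySem.Dict.getD_foldl_modify_append]
    rw [PySem.Dict.getD_empty]
    rfl
  have hcont : ∀ c, (((pvPairs g).foldl (fun d p => d.modify p.1 [] fun l => l ++ [p.2]) PySem.Dict.empty).contains c = true)
      ↔ c ∈ (pvPairs g).map (fun p => p.1) := by
    intro c
    rw [PySem.Dict.contains_iff_mem_keys, hkeys, PySem.Set.mem_ofList]
  rw [scan_eq _ (pvPairs g) _ hgetD hcont]
  rw [hkeys]
  simp only [pvCanon, pvHi, List.map_flatMap]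

-- ===== VERDICT (by name: the statement is the Claim_ definition above) =====
theorem morton_sort_indices_spec : Claim_equal_morton_sort_indices := by
  intro g hdom
  unfold Spec_morton_sort_indices
  by_cases hg : g ≤ 0
  · have hA : morton_sort_indices g = [] := by
      simp [morton_sort_indices, PySem.List.pyRange_one_eq_nil hg]
      rfl
    have hB : morton_sort_indices_alt g = [] := by
      simp [morton_sort_indices_alt, hg]
    rw [hA, hB]
  · have hb : g ≤ 2147483648 := by
      have := of_decide_eq_true hdom
      omega
    rw [A_eq_canon hb, B_eq_canon (by omega)]
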